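-- pv_equiv track=rewrite | github.com/detrin/ai-in-prague | scripts/render_leaflets.py | build_notable_people
-- ===== SOURCE A (Python) =====
-- def tex_escape(s):
--     if not isinstance(s, str):
--         return str(s) if s is not None else "---"
--     replacements = {
--         "&": r"\&",
--         "%": r"\%",
--         "$": r"\$",
--         "#": r"\#",
--         "_": r"\_",
--         "{": r"\{",
--         "}": r"\}",
--         "~": r"\textasciitilde{}",
--         "^": r"\textasciicircum{}",
--     }
--     for old, new in replacements.items():
--         s = s.replace(old, new)
--     return s
--
-- def build_notable_people(tm):
--     people = tm.get("notable_people") or []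
--     if not people:
--         return ""
--     lines = ["\\sectionhead{Notable People}", "{\\footnotesize"]
--     for p in people[:4]:
--         if isinstance(p, dict):
--             name = tex_escape(p.get("name", ""))
--             role = tex_escape(p.get("role", ""))
--             lines.append(f"{name} --- {role} \\\\")
--         else:
--             lines.append(f"{tex_escape(str(p))} \\\\")
--     lines.append("}")
--     return "\n".join(lines)
-- ===== SOURCE B (Python) =====
-- _REPL = {
--     "&": r"\&", "%": r"\%", "$": r"\$", "#": r"\#", "_": r"\_",
--     "{": r"\{", "}": r"\}", "~": r"\textasciitilde{}", "^": r"\textasciicircum{}",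
-- }
--
-- def _esc(s):
--     # run-based escape: one left-to-right scan that copies maximal runs of
--     # ordinary characters wholesale and splices in a replacement at each special
--     if not isinstance(s, str):
--         return str(s) if s is not None else "---"
--     pieces = []
--     start = 0
--     for i, c in enumerate(s):
--         r = _REPL.get(c)
--         if r is not None:
--             pieces.append(s[start:i])
--             pieces.append(r)
--             start = i + 1
--     pieces.append(s[start:])
--     return "".join(pieces)
--
-- def _entry(p):
--     if isinstance(p, dict):
--         return _esc(p.get("name", "")) + " --- " + _esc(p.get("role", "")) + " \\\\"
--     return _esc(str(p)) + " \\\\"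
--
-- def build_notable_people(tm):
--     people = tm.get("notable_people") or []
--     if not people:
--         return ""
--     body = "\n".join(_entry(p) for p in people[:4])
--     return "\\sectionhead{Notable People}\n{\\footnotesize\n" + body + "\n}"
-- ===== Notes on version B (the rewrite author's own statement) =====
-- stated objective: alternative
-- what changed: tex_escape's nine sequential whole-string replace passes are replaced by a single left-to-right scan that keeps a run-start index and a piece list, copying maximal runs of ordinary characters wholesale by slicing and splicing in the replacement at each special character, then joining the pieces once; the section itself is assembled by joining per-person entry strings onto a header/footer concatenation instead of appending to a lines list.
import Mathlib
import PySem

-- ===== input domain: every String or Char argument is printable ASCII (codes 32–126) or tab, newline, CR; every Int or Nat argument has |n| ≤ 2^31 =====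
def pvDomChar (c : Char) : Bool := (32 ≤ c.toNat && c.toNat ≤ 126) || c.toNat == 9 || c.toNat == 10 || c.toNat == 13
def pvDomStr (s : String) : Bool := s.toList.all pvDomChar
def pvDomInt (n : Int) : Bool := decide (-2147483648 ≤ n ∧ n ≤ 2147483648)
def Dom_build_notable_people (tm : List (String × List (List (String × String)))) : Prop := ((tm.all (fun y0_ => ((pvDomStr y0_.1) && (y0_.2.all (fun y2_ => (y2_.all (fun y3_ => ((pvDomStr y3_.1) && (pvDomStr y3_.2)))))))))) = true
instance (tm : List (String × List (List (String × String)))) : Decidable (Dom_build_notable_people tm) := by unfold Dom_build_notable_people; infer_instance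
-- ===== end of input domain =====

-- B escapes differently: instead of A's nine whole-string replace passes, one
-- left-to-right scan copies maximal runs of ordinary characters wholesale and
-- splices in a replacement at each special character (run/start bookkeeping),
-- and the section is assembled by a join of per-person entries onto a
-- header/footer concatenation instead of appending to a lines list; objective: alternative.


-- ===== PORT A =====
-- tex_escape: under the type convention s is always a String, so the
-- non-str / None guard of the Python is unreachable; the replacement dict
-- iterates in insertion order, ported as a foldl over the ordered pair list.
def texEscape (s : String) : String :=
  [("&", "\\&"), ("%", "\\%"), ("$", "\\$"), ("#", "\\#"), ("_", "\\_"),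
   ("{", "\\{"), ("}", "\\}"), ("~", "\\textasciitilde{}"), ("^", "\\textasciicircum{}")].foldl
    (fun acc p => PySem.Str.replace acc p.1 p.2) s

-- 'tm.get("notable_people") or []': a missing key and an empty list both give [].
-- Every element p of the typed list is a dict, so 'isinstance(p, dict)' is always true.
def build_notable_people (tm : List (String × List (List (String × String)))) : String :=
  let people := (PySem.Dict.get? (PySem.Dict.mk tm) "notable_people").getD []
  if people.isEmpty then ""
  else
    let lines := ["\\sectionhead{Notable People}", "{\\footnotesize"]
    let lines := (PySem.List.slice people none (some 4)).foldl
      (fun ls p =>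
        let name := texEscape (PySem.Dict.getD (PySem.Dict.mk p) "name" "")
        let role := texEscape (PySem.Dict.getD (PySem.Dict.mk p) "role" "")
        ls ++ [name ++ " --- " ++ role ++ " \\\\"]) lines
    PySem.Str.join "\n" (lines ++ ["}"])

-- ===== PORT B =====
-- _REPL.get(c): the literal replacement dict of Source B
def replOf (c : Char) : Option (List Char) :=
  if c = '&' then some "\\&".toList else if c = '%' then some "\\%".toList
  else if c = '$' then some "\\$".toList else if c = '#' then some "\\#".toList
  else if c = '_' then some "\\_".toList else if c = '{' then some "\\{".toList
  else if c = '}' then some "\\}".toList else if c = '~' then some "\\textasciitilde{}".toList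
  else if c = '^' then some "\\textasciicircum{}".toList else none

-- the body of Source B's for-loop over enumerate(s): state = (pieces, start)
def escStep (cs : List Char) (acc : List (List Char) × Int) (ic : Int × Char) :
    List (List Char) × Int :=
  match replOf ic.2 with
  | some r => (acc.1 ++ [PySem.Chars.slice cs (some acc.2) (some ic.1), r], ic.1 + 1)
  | none => acc

-- _esc of Source B: single scan, runs copied by slicing, then ''.join(pieces)
def escAlt (s : String) : String :=
  let cs := s.toList
  let st := (PySem.List.enumerate cs 0).foldl (escStep cs) ([], 0)
  String.ofList (PySem.Chars.join [] (st.1 ++ [PySem.Chars.slice cs (some st.2) none]))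

-- _entry of Source B (p is always a dict under the type convention)
def entryAlt (p : List (String × String)) : String :=
  escAlt (PySem.Dict.getD (PySem.Dict.mk p) "name" "") ++ " --- " ++
  escAlt (PySem.Dict.getD (PySem.Dict.mk p) "role" "") ++ " \\\\"

def build_notable_people_alt (tm : List (String × List (List (String × String)))) : String :=
  let people := (PySem.Dict.get? (PySem.Dict.mk tm) "notable_people").getD []
  if people.isEmpty then ""
  else
    let body := PySem.Str.join "\n" ((PySem.List.slice people none (some 4)).map entryAlt)
    "\\sectionhead{Notable People}\n{\\footnotesize\n" ++ body ++ "\n}"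

-- ===== PRECONDITION & SPEC =====
def Spec_build_notable_people (tm : List (String × List (List (String × String)))) (out : String) : Prop := out = build_notable_people_alt tm
instance (tm : List (String × List (List (String × String)))) (out : String) : Decidable (Spec_build_notable_people tm out) := by unfold Spec_build_notable_people; infer_instance

-- ===== CLAIM (what is proved, stated in full; the proofs are below) =====
def Claim_equal_build_notable_people : Prop := ∀ (tm : List (String × List (List (String × String)))), Dom_build_notable_people tm → Spec_build_notable_people tm (build_notable_people tm)

-- ===== LEMMAS AND PROOFS =====

-- the per-character escape both sides compute
def escCh (c : Char) : List Char := (replOf c).getD [c]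

-- single-character replace is a character-wise flatMap
theorem replace_go_single (o : Char) (new : List Char) :
    ∀ (l : List Char) (fuel : Nat) (acc : List Char), l.length ≤ fuel →
      PySem.Chars.replace.go [o] new fuel l acc
        = acc.reverse ++ l.flatMap (fun c => if c = o then new else [c]) := by
  intro l
  induction l with
  | nil =>
      intro fuel acc _
      cases fuel <;> simp [PySem.Chars.replace.go]
  | cons c t ih =>
      intro fuel acc h
      cases fuel with
      | zero => simp at h
      | succ fuel =>
        rw [PySem.Chars.replace.go]
        have hpre : (List.isPrefixOf [o] (c :: t)) = (o == c) := by
          simp [List.isPrefixOf]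
        rw [hpre]
        by_cases hc : c = o
        · subst hc
          rw [if_pos (by simp)]
          simp only [List.length_cons, List.length_nil, List.drop_succ_cons, List.drop_zero]
          rw [ih _ _ (by simpa using h)]
          simp
        · rw [if_neg (fun hEq => hc (beq_iff_eq.mp hEq).symm)]
          rw [ih _ _ (by simpa using h)]
          simp [hc]

theorem replace_single (o : Char) (new s : List Char) :
    PySem.Chars.replace s [o] new = s.flatMap (fun c => if c = o then new else [c]) := by
  rw [PySem.Chars.replace, if_neg (by simp)]
  simpa using replace_go_single o new s s.length [] le_rfl

-- A's nine-replace chain computes the character-wise escape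
theorem texEscape_eq_flatMap (s : String) :
    texEscape s = String.ofList (s.toList.flatMap escCh) := by
  apply String.toList_inj.mp
  have hof : ∀ l : List Char, (String.ofList l).toList = l := by intro l; simp
  simp only [texEscape, List.foldl, PySem.Str.toList_replace, hof, replace_single]
  simp only [List.flatMap_assoc]
  congr 1
  funext c
  by_cases h1 : c = '&'; · subst h1; rfl
  by_cases h2 : c = '%'; · subst h2; rfl
  by_cases h3 : c = '$'; · subst h3; rfl
  by_cases h4 : c = '#'; · subst h4; rfl
  by_cases h5 : c = '_'; · subst h5; rfl
  by_cases h6 : c = '{'; · subst h6; rfl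
  by_cases h7 : c = '}'; · subst h7; rfl
  by_cases h8 : c = '~'; · subst h8; rfl
  by_cases h9 : c = '^'; · subst h9; rfl
  simp [escCh, replOf, h1, h2, h3, h4, h5, h6, h7, h8, h9]

-- ''.join is flatten
theorem join_nil_flatten : ∀ xs : List (List Char), PySem.Chars.join [] xs = xs.flatten
  | [] => by decide
  | [x] => by simp [PySem.Chars.join_singleton]
  | x :: y :: t => by
      rw [PySem.Chars.join_cons_cons, join_nil_flatten (y :: t)]; simp

-- loop invariant of Source B's scan: flattening the pieces collected so far plus the
-- pending run reproduces the character-wise escape of the processed prefix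
theorem escAlt_go (cs : List Char) :
    ∀ (suf : List Char) (k start : Nat) (acc : List (List Char)),
      cs.drop k = suf → start ≤ k →
      (∀ c ∈ (cs.take k).drop start, replOf c = none) →
      acc.flatten ++ (cs.take k).drop start = (cs.take k).flatMap escCh →
      ∃ (acc' : List (List Char)) (start' : Nat),
        (PySem.List.enumerate suf (k : Int)).foldl (escStep cs) (acc, (start : Int))
          = (acc', (start' : Int))
        ∧ acc'.flatten ++ cs.drop start' = cs.flatMap escCh := by
  intro suf
  induction suf with
  | nil =>
      intro k start acc hdrop hsk _ hinv
      have hlen : cs.length ≤ k := by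
        by_contra h
        have := List.drop_eq_nil_iff.mp hdrop
        omega
      refine ⟨acc, start, by simp [PySem.List.enumerate_nil], ?_⟩
      rw [List.take_of_length_le hlen] at hinv
      exact hinv
  | cons c rest ih =>
      intro k start acc hdrop hsk hns hinv
      have hk : k < cs.length := by
        by_contra h
        rw [List.drop_eq_nil_iff.mpr (by omega)] at hdrop
        simp at hdrop
      have hck : cs[k] = c := by
        have h0 := congrArg (fun l => l[0]?) hdrop
        simp only [List.getElem?_drop, Nat.add_zero, List.getElem?_cons_zero] at h0
        simpa [List.getElem?_eq_getElem hk] using h0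
      have hrest : cs.drop (k + 1) = rest := by
        have : (cs.drop k).drop 1 = rest := by rw [hdrop]; simp
        simpa [List.drop_drop] using this
      have htake : cs.take (k + 1) = cs.take k ++ [c] := by
        rw [List.take_succ_eq_append_getElem hk, hck]
      rw [PySem.List.enumerate_cons, List.foldl_cons]
      cases hr : replOf c with
      | none =>
          have hstep : escStep cs (acc, (start : Int)) ((k : Int), c) = (acc, (start : Int)) := by
            simp [escStep, hr]
          rw [hstep]
          have hcast : ((k : Int) + 1) = ((k + 1 : Nat) : Int) := by push_cast; ring
          rw [hcast]
          apply ih (k + 1) start acc hrest (by omega)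
          · intro d hd
            rw [htake, List.drop_append_of_le_length (by simp; omega)] at hd
            rcases List.mem_append.mp hd with h | h
            · exact hns d h
            · simp at h; subst h; exact hr
          · rw [htake, List.drop_append_of_le_length (by simp; omega),
              List.flatMap_append]
            have hc1 : escCh c = [c] := by simp [escCh, hr]
            simp only [List.flatMap_cons, List.flatMap_nil, hc1, List.append_nil]
            rw [← List.append_assoc, hinv]
      | some r =>
          have hstep : escStep cs (acc, (start : Int)) ((k : Int), c)
              = (acc ++ [PySem.Chars.slice cs (some (start : Int)) (some (k : Int)), r],
                 (k : Int) + 1) := by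
            simp [escStep, hr]
          rw [hstep]
          have hcast : ((k : Int) + 1) = ((k + 1 : Nat) : Int) := by push_cast; ring
          rw [hcast]
          apply ih (k + 1) (k + 1) _ hrest le_rfl
          · intro d hd
            have : (cs.take (k + 1)).length ≤ k + 1 := by simp
            rw [List.drop_eq_nil_iff.mpr (by omega)] at hd
            exact absurd hd (List.not_mem_nil)
          · have hslice : PySem.Chars.slice cs (some (start : Int)) (some (k : Int))
                = (cs.take k).drop start := by
              rw [PySem.Chars.slice_eq_listSlice, PySem.List.slice_natCast, List.drop_take]
            rw [List.drop_eq_nil_iff.mpr (by simp), List.append_nil,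
              List.flatten_append, hslice, htake, List.flatMap_append]
            have hcr : escCh c = r := by simp [escCh, hr]
            simp only [List.flatMap_cons, List.flatMap_nil, hcr, List.append_nil,
              List.flatten_cons, List.flatten_cons, List.flatten_nil, List.append_nil]
            rw [← List.append_assoc, hinv]

-- Source B's scan computes the character-wise escape
theorem escAlt_eq_flatMap (s : String) :
    escAlt s = String.ofList (s.toList.flatMap escCh) := by
  obtain ⟨acc', start', heq, hinv⟩ :=
    escAlt_go s.toList s.toList 0 0 [] (by simp) le_rfl (by simp) (by simp)
  simp only [Nat.cast_zero] at heq
  unfold escAlt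
  simp only [heq]
  rw [join_nil_flatten, List.flatten_append]
  simp only [List.flatten_cons, List.flatten_nil, List.append_nil,
    PySem.Chars.slice_eq_listSlice, PySem.List.slice_from_natCast, hinv]

theorem texEscape_eq (s : String) : texEscape s = escAlt s := by
  rw [texEscape_eq_flatMap, escAlt_eq_flatMap]

-- joining A's accumulated lines equals B's header-plus-body concatenation
theorem flatMap_single {α β : Type} (g : α → β) : ∀ l : List α,
    l.flatMap (fun x => [g x]) = l.map g
  | [] => rfl
  | x :: t => by simp [List.flatMap_cons, flatMap_single g t]

theorem chars_join_append (nl rb : List Char) :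
    ∀ xs : List (List Char), xs ≠ [] →
      PySem.Chars.join nl (xs ++ [rb]) = PySem.Chars.join nl xs ++ nl ++ rb
  | [], h => absurd rfl h
  | [x], _ => by
      simp [PySem.Chars.join_cons_cons, PySem.Chars.join_singleton]
  | x :: y :: t, _ => by
      have ih := chars_join_append nl rb (y :: t) (by simp)
      simp only [List.cons_append] at ih ⊢
      rw [PySem.Chars.join_cons_cons, ih, PySem.Chars.join_cons_cons]
      simp [List.append_assoc]

theorem join_lines (xs : List String) (hxs : xs ≠ []) :
    PySem.Str.join "\n" (["\\sectionhead{Notable People}", "{\\footnotesize"] ++ xs ++ ["}"])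
      = "\\sectionhead{Notable People}\n{\\footnotesize\n" ++ PySem.Str.join "\n" xs ++ "\n}" := by
  obtain ⟨x, xs', rfl⟩ := List.exists_cons_of_ne_nil hxs
  apply String.toList_inj.mp
  simp only [PySem.Str.toList_join, List.map_append, List.map_cons, List.map_nil,
    String.toList_append, List.cons_append, List.nil_append]
  rw [PySem.Chars.join_cons_cons,
    show (("{\\footnotesize" : String).toList :: x.toList :: (List.map String.toList xs' ++ [("}" : String).toList]))
       = (("{\\footnotesize" : String).toList :: x.toList :: List.map String.toList xs') ++ [("}" : String).toList] from rfl,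
    chars_join_append _ _ _ (by simp), PySem.Chars.join_cons_cons]
  have hlit : ("\\sectionhead{Notable People}\n{\\footnotesize\n" : String).toList
      = ("\\sectionhead{Notable People}" : String).toList ++ ("\n" : String).toList
        ++ (("{\\footnotesize" : String).toList ++ ("\n" : String).toList) := by rfl
  rw [hlit]
  simp [List.append_assoc]

-- ===== VERDICT (by name: the statement is the Claim_ definition above) =====
theorem build_notable_people_spec : Claim_equal_build_notable_people := by
  intro tm _
  unfold Spec_build_notable_people build_notable_people build_notable_people_alt
  set people := (PySem.Dict.get? (PySem.Dict.mk tm) "notable_people").getD [] with hp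
  by_cases hemp : people.isEmpty
  · simp [hemp]
  · simp only [hemp, if_neg, Bool.false_eq_true, not_false_eq_true]
    rw [PySem.List.foldl_append_eq_flatMap]
    have hmap : (PySem.List.slice people none (some 4)).flatMap
        (fun p => [texEscape (PySem.Dict.getD (PySem.Dict.mk p) "name" "") ++ " --- " ++
                   texEscape (PySem.Dict.getD (PySem.Dict.mk p) "role" "") ++ " \\\\"])
        = (PySem.List.slice people none (some 4)).map entryAlt := by
      simp only [texEscape_eq]
      unfold entryAlt
      exact flatMap_single _ _
    rw [hmap]
    apply join_lines
    have hne : people ≠ [] := by simpa [List.isEmpty_iff] using hemp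
    simp only [ne_eq, List.map_eq_nil_iff]
    rw [PySem.List.slice_to people (by norm_num)]
    simp [hne]
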